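-- pv_equiv track=rewrite | github.com/NicolasRoss/CP460-Cryptography | A2/solution_A2.py | formatInput_playfair
-- ===== SOURCE A (Python) =====
-- def remove_nonalpha(text):
--     return  "".join([char.upper() for char in text if char.isalpha()])
--
-- def formatInput_playfair(plaintext):
--     modifiedPlain = ''
--     plaintext = remove_nonalpha(plaintext)
--     n = len(plaintext)
--     i = 0
--
--     while i < n:
--         if (plaintext[i] == "W"):
--             plaintext = plaintext[:i] + "VV" + plaintext[i + 1:]
--             n += 1
--         i += 1
--
--     if len(plaintext) % 2 > 0:
--         plaintext += 'X'
--
--     for i in range(len(plaintext)):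
--         if i % 2 == 0 and i != 0:
--             modifiedPlain += ' '
--             modifiedPlain += plaintext[i]
--
--         else:
--             modifiedPlain += plaintext[i]
--
--     for i in range(len(modifiedPlain)):
--         if i != 0:
--             if modifiedPlain[i - 1] == modifiedPlain[i]:
--                 modifiedPlain = modifiedPlain[:i] + 'X' + modifiedPlain[i + 1:]
--
--     return modifiedPlain
-- ===== SOURCE B (Python) =====
-- def formatInput_playfair(plaintext):
--     # single left-to-right pass: collect letters (W -> VV), pad, then emit
--     # spaced pairs while deduplicating against the previously emitted char
--     letters = []
--     for ch in plaintext: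
--         if ch.isalpha():
--             u = ch.upper()
--             if u == 'W':
--                 letters.append('V')
--                 letters.append('V')
--             else:
--                 letters.append(u)
--     if len(letters) % 2 == 1:
--         letters.append('X')
--     out = []
--     prev = None
--     for i, c in enumerate(letters):
--         if i != 0 and i % 2 == 0:
--             out.append(' ')
--             prev = ' '
--         if c == prev:
--             c = 'X'
--         out.append(c)
--         prev = c
--     return ''.join(out)
-- ===== Notes on version B (the rewrite author's own statement) =====
-- stated objective: faster
-- what changed: A makes three passes with repeated O(n) string re-slicing (the W->VV while loop, spacing by index, and an in-place dedup that rebuilds the string at every replacement); B does the whole job in one left-to-right pass over list buffers, expanding W to VV as letters are collected and deduplicating against the previously emitted character.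
import Mathlib
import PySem

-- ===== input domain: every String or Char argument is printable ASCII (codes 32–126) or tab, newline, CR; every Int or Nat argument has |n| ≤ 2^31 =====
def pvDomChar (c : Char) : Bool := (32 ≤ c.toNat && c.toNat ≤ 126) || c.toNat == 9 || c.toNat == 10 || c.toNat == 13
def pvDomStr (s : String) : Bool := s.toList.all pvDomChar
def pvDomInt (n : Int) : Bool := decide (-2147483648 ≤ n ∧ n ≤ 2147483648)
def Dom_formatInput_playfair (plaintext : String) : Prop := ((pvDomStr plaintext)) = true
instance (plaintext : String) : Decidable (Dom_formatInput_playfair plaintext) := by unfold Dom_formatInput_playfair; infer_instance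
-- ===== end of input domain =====

-- B replaces A's three passes with repeated O(n) string re-slicing by one left-to-right pass
-- over list buffers tracking the previously emitted character (objective: faster).

-- ===== PORT A =====
-- "".join([char.upper() for char in text if char.isalpha()])
def pvRemoveNonalpha (text : List Char) : List Char :=
  (text.filter (fun c => PySem.Chars.isalpha c)).map PySem.Chars.upperChar

-- the 'while i < n' loop with the W -> "VV" splice; fuel is only a totality guard:
-- each iteration consumes exactly 1 fuel and (length - i) + count 'W' fuel suffices (proved below).
-- plaintext[i] is always in range here (0 ≤ i < n = len), so List.getD is exact (cf. PySem.List.pyGetD_natCast);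
-- plaintext[:i] / plaintext[i+1:] with 0 ≤ i are take/drop (cf. PySem.List.slice_to_natCast / slice_from_natCast).
def pvWloop : Nat → List Char → Nat → Nat → List Char
  | 0, s, _, _ => s
  | fuel+1, s, i, n =>
    if i < n then
      if s.getD i ' ' = 'W' then
        pvWloop fuel (s.take i ++ ['V', 'V'] ++ s.drop (i+1)) (i+1) (n+1)
      else
        pvWloop fuel s (i+1) n
    else s

-- one step of 'for i in range(len(plaintext))' building modifiedPlain (index in range: getD exact)
def pvSpaceStep (s : List Char) (acc : List Char) (i : Nat) : List Char :=
  if i % 2 = 0 ∧ i ≠ 0 then acc ++ [' '] ++ [s.getD i ' '] else acc ++ [s.getD i ' ']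

-- one step of 'for i in range(len(modifiedPlain))' with the in-place 'X' overwrite (indices in range)
def pvDedupStep (m : List Char) (i : Nat) : List Char :=
  if i ≠ 0 then
    if m.getD (i-1) ' ' = m.getD i ' ' then m.take i ++ ['X'] ++ m.drop (i+1) else m
  else m

def formatInput_playfair (plaintext : String) : String :=
  let p0 := pvRemoveNonalpha plaintext.toList
  let p1 := pvWloop (p0.length + p0.count 'W') p0 0 p0.length
  let p2 := if p1.length % 2 > 0 then p1 ++ ['X'] else p1
  let m  := (List.range p2.length).foldl (pvSpaceStep p2) []
  String.ofList ((List.range m.length).foldl pvDedupStep m)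

-- ===== PORT B =====
-- the letter-collecting loop of Source B: filter, uppercase, expand W to two appended 'V's
def pvLettersStep (acc : List Char) (ch : Char) : List Char :=
  if PySem.Chars.isalpha ch then
    if PySem.Chars.upperChar ch = 'W' then (acc ++ ['V']) ++ ['V']
    else acc ++ [PySem.Chars.upperChar ch]
  else acc

-- the single output pass of Source B over enumerate(letters): (out, prev) state
def pvEmit : List Char → Nat → Option Char → List Char → List Char
  | [], _, _, out => out
  | c :: rest, i, prev, out =>
    let sp := if i ≠ 0 ∧ i % 2 = 0 then (out ++ [' '], some ' ') else (out, prev)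
    let c' := if some c = sp.2 then 'X' else c
    pvEmit rest (i+1) (some c') (sp.1 ++ [c'])

def formatInput_playfair_alt (plaintext : String) : String :=
  let l0 := plaintext.toList.foldl pvLettersStep []
  let l1 := if l0.length % 2 = 1 then l0 ++ ['X'] else l0
  String.ofList (pvEmit l1 0 none [])

-- ===== PRECONDITION & SPEC =====
def Spec_formatInput_playfair (plaintext : String) (out : String) : Prop := out = formatInput_playfair_alt plaintext
instance (plaintext : String) (out : String) : Decidable (Spec_formatInput_playfair plaintext out) := by unfold Spec_formatInput_playfair; infer_instance

-- ===== CLAIM (what is proved, stated in full; the proofs are below) =====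
def Claim_equal_formatInput_playfair : Prop := ∀ (plaintext : String), Dom_formatInput_playfair plaintext → Spec_formatInput_playfair plaintext (formatInput_playfair plaintext)

-- ===== LEMMAS AND PROOFS =====

-- specification-side vocabulary: W-expansion, space insertion, sequential dedup with previous char
def pvExp (c : Char) : List Char := if c = 'W' then ['V', 'V'] else [c]

def pvSpF : Nat → List Char → List Char
  | _, [] => []
  | k, c :: rest => (if k % 2 = 0 ∧ k ≠ 0 then [' ', c] else [c]) ++ pvSpF (k+1) rest

def pvSeqD : List Char → Option Char → List Char
  | [], _ => []
  | c :: rest, prev =>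
    (if some c = prev then 'X' else c) :: pvSeqD rest (some (if some c = prev then 'X' else c))

theorem pvUpperNeSpace (c : Char) (h : PySem.Chars.isalpha c = true) : PySem.Chars.upperChar c ≠ ' ' := by
  simp only [PySem.Chars.isalpha, Bool.or_eq_true, PySem.Chars.isupper, PySem.Chars.islower,
    Bool.and_eq_true, decide_eq_true_eq] at h
  unfold PySem.Chars.upperChar PySem.Chars.islower
  intro hEq
  have h32 : (' ' : Char).toNat = 32 := by decide
  split at hEq
  · next hl =>
    simp only [Bool.and_eq_true, decide_eq_true_eq] at hl
    have h1 : (97:Nat) ≤ c.toNat := hl.1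
    have h2 : c.toNat ≤ 122 := hl.2
    have hv : (Char.ofNat (c.toNat - 32)).toNat = c.toNat - 32 := by
      rw [Char.toNat_ofNat, if_pos (Or.inl (by omega))]
    rw [hEq, h32] at hv; omega
  · next hl =>
    simp only [Bool.and_eq_true, decide_eq_true_eq] at hl
    rcases h with ⟨h1, h2⟩ | ⟨h1, h2⟩
    · have h1' : (65:Nat) ≤ c.toNat := h1
      have h2' : c.toNat ≤ 90 := h2
      rw [hEq, h32] at h1' h2'; omega
    · exact hl ⟨h1, h2⟩

theorem pvGetD_append (pre suf : List Char) (c d : Char) :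
    (pre ++ c :: suf).getD pre.length d = c := by
  simp [List.getD]

theorem pvLetters_eq (t : List Char) (acc : List Char) :
    t.foldl pvLettersStep acc = acc ++ (pvRemoveNonalpha t).flatMap pvExp := by
  induction t generalizing acc with
  | nil => simp [pvRemoveNonalpha]
  | cons c rest ih =>
    simp only [List.foldl_cons, ih, pvRemoveNonalpha, List.filter_cons]
    by_cases h : PySem.Chars.isalpha c = true
    · simp only [h, if_pos, List.map_cons, List.flatMap_cons, pvLettersStep, pvExp]
      by_cases hw : PySem.Chars.upperChar c = 'W' <;> simp [hw]
    · simp [pvLettersStep, h]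

theorem pvWloop_eq (fuel : Nat) (pre suf : List Char) (n : Nat)
    (hf : suf.length + suf.count 'W' ≤ fuel) (hn : n = pre.length + suf.length) :
    pvWloop fuel (pre ++ suf) pre.length n = pre ++ suf.flatMap pvExp := by
  induction fuel generalizing pre suf n with
  | zero =>
    have : suf = [] := List.length_eq_zero_iff.mp (by omega)
    subst this; simp [pvWloop]
  | succ fuel ih =>
    cases suf with
    | nil => simp [pvWloop, hn]
    | cons c rest =>
      have hlt : pre.length < n := by simp at hn; omega
      rw [pvWloop, if_pos hlt, pvGetD_append]
      by_cases hw : c = 'W'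
      · subst hw
        rw [if_pos rfl]
        have h1 : (pre ++ 'W' :: rest).take pre.length = pre := List.take_left
        have h2 : (pre ++ 'W' :: rest).drop (pre.length + 1) = rest := by
          rw [show pre ++ 'W' :: rest = (pre ++ ['W']) ++ rest by simp]
          exact List.drop_left' (by simp)
        rw [h1, h2]
        have hre : pre ++ ['V', 'V'] ++ rest = (pre ++ ['V']) ++ ('V' :: rest) := by simp
        have hcount : ('V' :: rest).length + ('V' :: rest).count 'W' ≤ fuel := by
          simp at hf ⊢; omega
        have := ih (pre ++ ['V']) ('V' :: rest) (n + 1) hcount (by simp at hn ⊢; omega)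
        rw [show (pre ++ ['V']).length = pre.length + 1 by simp] at this
        rw [hre, this]
        simp [pvExp]
      · rw [if_neg (by simpa using hw)]
        have := ih (pre ++ [c]) rest n (by simp [hw] at hf ⊢; omega)
          (by simp at hn ⊢; omega)
        rw [show (pre ++ [c]).length = pre.length + 1 by simp,
            show (pre ++ [c]) ++ rest = pre ++ c :: rest by simp] at this
        rw [this]
        simp [pvExp, hw]

theorem pvSpace_eq (s : List Char) (m k : Nat) (acc : List Char) (h : k + m = s.length) :
    (List.range' k m).foldl (pvSpaceStep s) acc = acc ++ pvSpF k (s.drop k) := by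
  induction m generalizing k acc with
  | zero => simp [List.drop_of_length_le (by omega : s.length ≤ k), pvSpF]
  | succ m ih =>
    have hk : k < s.length := by omega
    rw [List.range'_succ, List.foldl_cons]
    have hdrop : s.drop k = s[k] :: s.drop (k+1) := List.drop_eq_getElem_cons hk
    have hgd : s.getD k ' ' = s[k] := List.getD_eq_getElem s ' ' hk
    rw [ih (k+1) _ (by omega), hdrop, pvSpF]
    unfold pvSpaceStep
    have hget2 : s[k]?.getD ' ' = s[k] := by simp [List.getElem?_eq_getElem hk]
    by_cases hc : k % 2 = 0 ∧ k ≠ 0 <;> simp [hc, hget2]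

theorem pvDedup_eq (suf pre : List Char) :
    (List.range' pre.length suf.length).foldl pvDedupStep (pre ++ suf) = pre ++ pvSeqD suf pre.getLast? := by
  induction suf generalizing pre with
  | nil => simp [pvSeqD]
  | cons c rest ih =>
    rw [List.length_cons, List.range'_succ, List.foldl_cons]
    rcases List.eq_nil_or_concat pre with rfl | ⟨q, a, rfl⟩
    · -- i = 0: no replacement, c' = c
      have hstep : pvDedupStep (([] : List Char) ++ c :: rest) ([] : List Char).length = [c] ++ rest := by
        simp [pvDedupStep]
      rw [hstep]
      have h1 := ih [c]
      simp only [List.length_singleton, List.getLast?_singleton] at h1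
      simp only [List.length_nil, List.nil_append, Nat.zero_add]
      rw [h1]
      simp [pvSeqD]
    · simp only [List.concat_eq_append]
      have hlen : (q ++ [a]).length = q.length + 1 := by simp
      have hg1 : ((q ++ [a]) ++ c :: rest).getD ((q ++ [a]).length - 1) ' ' = a := by
        rw [hlen]
        simp only [Nat.add_sub_cancel, List.append_assoc, List.singleton_append]
        exact pvGetD_append q (c :: rest) a ' '
      have hg2 : ((q ++ [a]) ++ c :: rest).getD (q ++ [a]).length ' ' = c := pvGetD_append _ _ _ _
      have hlast : (q ++ [a]).getLast? = some a := List.getLast?_concat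
      by_cases hac : a = c
      · have hstep : pvDedupStep ((q ++ [a]) ++ c :: rest) (q ++ [a]).length
            = ((q ++ [a]) ++ ['X']) ++ rest := by
          rw [pvDedupStep, if_pos (by simp), hg1, hg2, if_pos hac]
          rw [List.take_left, show ((q ++ [a]) ++ c :: rest) = ((q ++ [a]) ++ [c]) ++ rest by simp,
            List.drop_left' (by simp)]
        rw [hstep]
        have h2 := ih ((q ++ [a]) ++ ['X'])
        simp only [List.getLast?_concat, List.length_append, List.length_singleton] at h2 ⊢
        rw [h2, pvSeqD]
        simp [hac]
      · have hstep : pvDedupStep ((q ++ [a]) ++ c :: rest) (q ++ [a]).length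
            = (q ++ [a]) ++ c :: rest := by
          rw [pvDedupStep, if_pos (by simp), hg1, hg2, if_neg hac]
        rw [hstep]
        have h2 := ih ((q ++ [a]) ++ [c])
        simp only [List.getLast?_concat, List.length_append, List.length_singleton] at h2
        rw [show ((q ++ [a]) ++ c :: rest) = ((q ++ [a]) ++ [c]) ++ rest by simp]
        simp only [List.length_append, List.length_singleton] at ⊢
        rw [h2, pvSeqD]
        have hne : ¬ (some c = some a) := by simpa [eq_comm] using hac
        simp [hlast, hne]

theorem pvEmit_eq (rest : List Char) (k : Nat) (prev : Option Char) (out : List Char)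
    (hs : ∀ x ∈ rest, x ≠ ' ') (hp : prev ≠ some ' ') :
    pvEmit rest k prev out = out ++ pvSeqD (pvSpF k rest) prev := by
  induction rest generalizing k prev out with
  | nil => simp [pvEmit, pvSpF, pvSeqD]
  | cons c rest ih =>
    have hc : c ≠ ' ' := hs c (by simp)
    have hs' : ∀ x ∈ rest, x ≠ ' ' := fun x hx => hs x (by simp [hx])
    have hcc : ¬ (some c = some ' ') := by simpa using hc
    by_cases hk : k % 2 = 0 ∧ k ≠ 0
    · simp only [pvEmit, pvSpF, if_pos (show k ≠ 0 ∧ k % 2 = 0 from ⟨hk.2, hk.1⟩), if_pos hk,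
        if_neg hcc]
      rw [ih (k+1) (some c) _ hs' (by simpa using hc)]
      rw [show ([' ', c] ++ pvSpF (k+1) rest) = ' ' :: c :: pvSpF (k+1) rest by simp]
      rw [pvSeqD, if_neg (by simpa [eq_comm] using hp), pvSeqD, if_neg hcc]
      simp
    · simp only [pvEmit, pvSpF, if_neg (show ¬ (k ≠ 0 ∧ k % 2 = 0) by tauto), if_neg hk]
      rw [ih (k+1) _ _ hs' (by simp; split <;> simp_all)]
      rw [show ([c] ++ pvSpF (k+1) rest) = c :: pvSpF (k+1) rest by simp]
      rw [pvSeqD]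
      simp

theorem pvNoSpace (t : List Char) (x : Char) (hx : x ∈ (pvRemoveNonalpha t).flatMap pvExp) : x ≠ ' ' := by
  simp only [List.mem_flatMap, pvRemoveNonalpha, List.mem_map, List.mem_filter] at hx
  obtain ⟨u, ⟨c, ⟨hc, ha⟩, rfl⟩, hxu⟩ := hx
  unfold pvExp at hxu
  split at hxu
  · simp at hxu; subst hxu; decide
  · simp at hxu; subst hxu; exact pvUpperNeSpace c ha

-- ===== VERDICT (by name: the statement is the Claim_ definition above) =====
theorem formatInput_playfair_spec : Claim_equal_formatInput_playfair := by
  intro plaintext _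
  unfold Spec_formatInput_playfair formatInput_playfair formatInput_playfair_alt
  dsimp only
  have hB0 := pvLetters_eq plaintext.toList []
  simp only [List.nil_append] at hB0
  rw [hB0]
  have hA0 : pvWloop ((pvRemoveNonalpha plaintext.toList).length
      + (pvRemoveNonalpha plaintext.toList).count 'W') (pvRemoveNonalpha plaintext.toList) 0
      (pvRemoveNonalpha plaintext.toList).length
      = (pvRemoveNonalpha plaintext.toList).flatMap pvExp := by
    have := pvWloop_eq ((pvRemoveNonalpha plaintext.toList).length
      + (pvRemoveNonalpha plaintext.toList).count 'W') [] (pvRemoveNonalpha plaintext.toList)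
      (pvRemoveNonalpha plaintext.toList).length (le_refl _) (by simp)
    simpa using this
  rw [hA0]
  have hpar : ∀ n : Nat, (n % 2 > 0) = (n % 2 = 1) := fun n => by
    apply propext; omega
  simp only [hpar]
  set L := if ((pvRemoveNonalpha plaintext.toList).flatMap pvExp).length % 2 = 1
    then (pvRemoveNonalpha plaintext.toList).flatMap pvExp ++ ['X']
    else (pvRemoveNonalpha plaintext.toList).flatMap pvExp with hL
  have hnosp : ∀ x ∈ L, x ≠ ' ' := by
    intro x hx
    rw [hL] at hx
    split at hx
    · rcases List.mem_append.mp hx with h | h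
      · exact pvNoSpace _ _ h
      · simp at h; subst h; decide
    · exact pvNoSpace _ _ hx
  have hsp : (List.range L.length).foldl (pvSpaceStep L) [] = pvSpF 0 L := by
    rw [List.range_eq_range']
    have := pvSpace_eq L L.length 0 [] (by omega)
    simpa using this
  rw [hsp]
  have hded : (List.range (pvSpF 0 L).length).foldl pvDedupStep (pvSpF 0 L)
      = pvSeqD (pvSpF 0 L) none := by
    rw [List.range_eq_range']
    have := pvDedup_eq (pvSpF 0 L) []
    simpa using this
  rw [hded]
  rw [pvEmit_eq L 0 none [] hnosp (by simp)]
  simp
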